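-- pv_equiv track=rewrite | github.com/posl/comment_recommendation | script/mod_gen/1_time/zh/216_C/7.py | solve
-- ===== SOURCE A (Python) =====
-- def solve(n):
--     res = []
--     while n > 0:
--         if n % 2 == 0:
--             n = n // 2
--             res.append('B')
--         else:
--             n = n - 1
--             res.append('A')
--     return ''.join(res[::-1])
-- ===== SOURCE B (Python) =====
-- def solve(n):
--     if n <= 0:
--         return ''
--     s = bin(n)[2:]
--     res = ['A']
--     for c in s[1:]:
--         res.append('B')
--         if c == '1':
--             res.append('A')
--     return ''.join(res)
-- ===== Notes on version B (the rewrite author's own statement) =====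
-- stated objective: idiomatic
-- what changed: Replaces the halve/decrement loop that builds the string backwards and reverses it with a single forward scan over the precomputed binary digits (bin(n)[2:]): 'A' for the leading bit, then 'B' plus optional 'A' per remaining bit.
import Mathlib
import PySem

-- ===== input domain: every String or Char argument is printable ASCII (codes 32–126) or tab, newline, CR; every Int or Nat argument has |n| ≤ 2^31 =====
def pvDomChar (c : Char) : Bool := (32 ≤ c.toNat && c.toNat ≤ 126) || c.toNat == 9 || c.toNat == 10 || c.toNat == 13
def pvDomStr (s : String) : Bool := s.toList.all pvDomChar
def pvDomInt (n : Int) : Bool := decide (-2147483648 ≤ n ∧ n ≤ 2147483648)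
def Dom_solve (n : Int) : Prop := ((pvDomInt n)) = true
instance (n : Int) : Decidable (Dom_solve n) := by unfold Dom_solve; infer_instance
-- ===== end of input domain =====

-- B replaces A's halve/decrement loop (built backwards, then reversed) with one forward
-- scan over the precomputed binary digits of n; objective: idiomatic, same value everywhere.

-- ===== PORT A =====
-- the while loop of A as structural recursion on the shrinking n
def solveLoop (n : Int) (res : List Char) : List Char :=
  if h : n > 0 then
    if PySem.Int.mod n 2 == 0 then
      solveLoop (PySem.Int.floordiv n 2) (res ++ ['B'])
    else
      solveLoop (n - 1) (res ++ ['A'])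
  else res
termination_by n.toNat
decreasing_by
  · rw [PySem.Int.floordiv_eq_ediv_of_pos (by omega : (0:Int) < 2)]; omega
  · omega

def solve (n : Int) : String :=
  String.mk (((PySem.List.slice? (solveLoop n []) none none (-1)).getD []))

-- ===== PORT B =====
-- hand port of Python's bin(m)[2:] for m > 0 (exact there: MSB-first binary digits; [] at 0)
def binChars (m : Nat) : List Char :=
  if m = 0 then [] else binChars (m / 2) ++ [if m % 2 = 1 then '1' else '0']
termination_by m
decreasing_by omega

def solve_alt (n : Int) : String :=
  if n ≤ 0 then "" else
    let s := binChars n.toNat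
    String.mk ((PySem.List.slice s (some 1) none).foldl
      (fun acc c =>
        let acc := acc ++ ['B']
        if c == '1' then acc ++ ['A'] else acc) ['A'])

-- ===== PRECONDITION & SPEC =====
def Spec_solve (n : Int) (out : String) : Prop := out = solve_alt n
instance (n : Int) (out : String) : Decidable (Spec_solve n out) := by unfold Spec_solve; infer_instance

-- ===== CLAIM (what is proved, stated in full; the proofs are below) =====
def Claim_equal_solve : Prop := ∀ (n : Int), Dom_solve n → Spec_solve n (solve n)

-- ===== LEMMAS AND PROOFS =====

-- the common specification of both programs
def gspec (m : Nat) : List Char :=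
  if m = 0 then [] else
  if m = 1 then ['A'] else
  gspec (m / 2) ++ ('B' :: (if m % 2 = 1 then ['A'] else []))
termination_by m
decreasing_by omega

lemma gspec_odd (m : Nat) (h : m % 2 = 1) : gspec m = gspec (m - 1) ++ ['A'] := by
  by_cases h1 : m = 1
  · subst h1
    conv_lhs => rw [gspec]
    conv_rhs => rw [gspec]
    simp
  · have hne0 : m ≠ 0 := by omega
    have h2 : m - 1 ≠ 0 := by omega
    have h3 : m - 1 ≠ 1 := by omega
    conv_lhs => rw [gspec]
    conv_rhs => rw [gspec]
    have hd : (m - 1) / 2 = m / 2 := by omega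
    simp only [if_neg hne0, if_neg h1, if_neg h2, if_neg h3, h, hd,
      if_neg (show ¬ (m - 1) % 2 = 1 by omega)]
    simp

lemma solveLoop_eq (n : Int) (res : List Char) :
    solveLoop n res = res ++ (gspec n.toNat).reverse := by
  induction n, res using solveLoop.induct with
  | case1 n res hpos hmod ih =>
    rw [solveLoop]
    simp only [dif_pos hpos, if_pos hmod, ih]
    have hm2 : n.toNat % 2 = 0 := by
      have := PySem.Int.mod_eq_emod_of_pos (a := n) (b := 2) (by omega)
      simp only [beq_iff_eq] at hmod; omega
    have hne0 : n.toNat ≠ 0 := by omega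
    have hne1 : n.toNat ≠ 1 := by omega
    have hdiv : (PySem.Int.floordiv n 2).toNat = n.toNat / 2 := by
      rw [PySem.Int.floordiv_eq_ediv_of_pos (by omega : (0:Int) < 2)]; omega
    rw [hdiv]
    conv_rhs => rw [gspec]
    simp [hne0, hne1, if_neg (by omega : ¬ n.toNat % 2 = 1)]
  | case2 n res hpos hmod ih =>
    rw [solveLoop]
    simp only [dif_pos hpos, if_neg hmod, ih]
    have hm2 : n.toNat % 2 = 1 := by
      have := PySem.Int.mod_eq_emod_of_pos (a := n) (b := 2) (by omega)
      simp only [beq_iff_eq] at hmod; omega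
    have hsub : (n - 1).toNat = n.toNat - 1 := by omega
    rw [hsub, gspec_odd _ hm2]
    simp
  | case3 n res hpos =>
    rw [solveLoop]
    have : n.toNat = 0 := by omega
    simp [dif_neg hpos, this, gspec]

-- B's per-character step as a flatMap body
def hstep (c : Char) : List Char := 'B' :: (if c == '1' then ['A'] else [])

lemma binChars_ne_nil (m : Nat) (h : 0 < m) : binChars m ≠ [] := by
  rw [binChars]; simp only [if_neg (show m ≠ 0 by omega)]; simp

lemma gspec_eq_flat (m : Nat) (h : 0 < m) :
    gspec m = 'A' :: ((binChars m).drop 1).flatMap hstep := by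
  induction m using Nat.strong_induction_on with
  | _ m ih =>
    rcases Nat.eq_or_lt_of_le h with h1 | h1
    · rw [← h1]; rw [gspec, binChars, binChars]; simp
    · have hne0 : m ≠ 0 := by omega
      have hne1 : m ≠ 1 := by omega
      have hhalf : 0 < m / 2 := by omega
      rw [gspec, binChars]
      simp only [if_neg hne0, if_neg hne1]
      rw [List.drop_append_of_le_length (by
        have := List.length_pos_iff.mpr (binChars_ne_nil _ hhalf); omega)]
      rw [List.flatMap_append, ← List.cons_append,
        ← ih (m / 2) (by omega) hhalf]
      congr 1
      by_cases hp : m % 2 = 1 <;> simp [hstep, hp]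

theorem solve_spec : Claim_equal_solve := by
  intro n _
  unfold Spec_solve solve solve_alt
  rw [solveLoop_eq, PySem.List.slice?_none_none_neg_one]
  simp only [List.nil_append, Option.getD_some, List.reverse_reverse]
  by_cases hn : n ≤ 0
  · have : n.toNat = 0 := by omega
    simp [hn, this, gspec]
    rfl
  · simp only [if_neg hn]
    have hpos : 0 < n.toNat := by omega
    rw [gspec_eq_flat _ hpos, PySem.List.slice_from_one]
    congr 1
    have : ∀ (l : List Char) (init : List Char),
        l.foldl (fun acc c =>
          let acc := acc ++ ['B']
          if c == '1' then acc ++ ['A'] else acc) init = init ++ l.flatMap hstep := by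
      intro l
      induction l with
      | nil => simp
      | cons c t iht =>
        intro init
        simp only [List.foldl_cons, List.flatMap_cons, iht]
        by_cases hc : c == '1' <;> simp [hc, hstep]
    rw [this, List.drop_one]
    simp
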